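-- pv_equiv track=rewrite | github.com/Iftikhar-hasan12/Data_communication | Lab_manual_03/com-122.py | ToEncode
-- ===== SOURCE A (Python) =====
-- def ToEncode(data):
--     result = []
--     signal = []
--     current = 1  # starting level: +1
--
--     for bit in data:
--         if bit == '0':
--             current = -current  # transition at beginning for 0
--
--         # Add signal levels for plotting
--         signal.extend([current, -current])
--
--         # Simple binary encoding
--         if current == 1:
--             result.extend([1, 0])
--         elif current == -1:
--             result.extend([0, 1])
--
--         current = -current  # mandatory mid-bit transition
--
--     return result, signal
-- ===== SOURCE B (Python) =====
-- def ToEncode(data):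
--     # One pass builds only the levels levels; the result bits are then
--     # derived in a second pass from the first level of each bit period.
--     levels = []
--     current = 1
--     for bit in data:
--         if bit == '0':
--             current = -current
--         levels.extend([current, -current])
--         current = -current
--     result = []
--     for level in levels[::2]:
--         result.extend([1, 0] if level == 1 else [0, 1])
--     return result, levels
-- ===== Notes on version B (the rewrite author's own statement) =====
-- stated objective: alternative
-- what changed: B maintains only the signal/current state in one pass and derives the result bits afterwards from every second signal level (signal[::2]), instead of A's single loop that accumulates result and signal together with an explicit three-way branch on current.
import Mathlib
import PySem

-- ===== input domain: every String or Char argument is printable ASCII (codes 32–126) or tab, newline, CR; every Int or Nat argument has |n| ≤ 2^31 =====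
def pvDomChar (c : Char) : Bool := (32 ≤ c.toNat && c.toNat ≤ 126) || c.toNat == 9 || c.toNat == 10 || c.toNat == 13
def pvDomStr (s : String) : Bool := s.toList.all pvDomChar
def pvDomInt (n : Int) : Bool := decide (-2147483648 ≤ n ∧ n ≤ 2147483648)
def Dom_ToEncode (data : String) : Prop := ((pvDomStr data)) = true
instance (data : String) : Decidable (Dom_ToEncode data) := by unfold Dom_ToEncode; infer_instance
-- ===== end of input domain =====

-- B builds only the signal in one pass and derives the result bits afterwards from every second signal level; alternative decomposition, same cost.


-- ===== PORT A =====
-- loop body of A, carrying (result, signal, current)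
def pvStepA (st : List Int × List Int × Int) (bit : Char) : List Int × List Int × Int :=
  let current : Int := if bit == '0' then -st.2.2 else st.2.2
  let signal := st.2.1 ++ [current, -current]
  let result :=
    if current == 1 then st.1 ++ [1, 0]
    else if current == -1 then st.1 ++ [0, 1]
    else st.1
  (result, signal, -current)

def ToEncode (data : String) : List Int × List Int :=
  let st := data.toList.foldl pvStepA ([], [], 1)
  (st.1, st.2.1)

-- ===== PORT B =====
-- loop body of B's first pass, carrying (signal, current)
def pvStepB (st : List Int × Int) (bit : Char) : List Int × Int :=
  let current : Int := if bit == '0' then -st.2 else st.2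
  (st.1 ++ [current, -current], -current)

-- hand port of signal[::2] (step-2 slice from index 0): exact for this step
def pvEveryOther : List Int → List Int
  | [] => []
  | [x] => [x]
  | x :: _ :: rest => x :: pvEveryOther rest

def ToEncode_alt (data : String) : List Int × List Int :=
  let st := data.toList.foldl pvStepB ([], 1)
  let levels := st.1
  let result := (pvEveryOther levels).foldl
    (fun r level => r ++ (if level == 1 then [1, 0] else [0, 1])) []
  (result, levels)

-- ===== PRECONDITION & SPEC =====
def Spec_ToEncode (data : String) (out : List Int × List Int) : Prop := out = ToEncode_alt data
instance (data : String) (out : List Int × List Int) : Decidable (Spec_ToEncode data out) := by unfold Spec_ToEncode; infer_instance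

-- ===== CLAIM (what is proved, stated in full; the proofs are below) =====
def Claim_equal_ToEncode : Prop := ∀ (data : String), Dom_ToEncode data → Spec_ToEncode data (ToEncode data)

-- ===== LEMMAS AND PROOFS =====

-- clean recursive description of the encoding, used to relate both folds
def pvEnc : List Char → Int → List Int × List Int × Int
  | [], c => ([], [], c)
  | b :: l, c =>
    let cur : Int := if b == '0' then -c else c
    let rest := pvEnc l (-cur)
    ((if cur == 1 then [1, 0] else [0, 1]) ++ rest.1, cur :: -cur :: rest.2.1, rest.2.2)

theorem foldA_eq (l : List Char) : ∀ (r0 s0 : List Int) (c : Int), c = 1 ∨ c = -1 →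
    l.foldl pvStepA (r0, s0, c)
    = (r0 ++ (pvEnc l c).1, s0 ++ (pvEnc l c).2.1, (pvEnc l c).2.2) := by
  induction l with
  | nil => intro r0 s0 c hc; simp [pvEnc]
  | cons b l ih =>
    intro r0 s0 c hc
    rw [List.foldl_cons]
    rcases hc with h | h <;> subst h <;> by_cases hb : (b == '0') = true
    · rw [show pvStepA (r0, s0, 1) b = (r0 ++ [0, 1], s0 ++ [-1, 1], 1) by
        simp [pvStepA, hb]]
      rw [ih _ _ 1 (Or.inl rfl)]
      simp [pvEnc, hb]
    · rw [show pvStepA (r0, s0, 1) b = (r0 ++ [1, 0], s0 ++ [1, -1], -1) by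
        simp [pvStepA, hb]]
      rw [ih _ _ (-1) (Or.inr rfl)]
      simp [pvEnc, hb]
    · rw [show pvStepA (r0, s0, -1) b = (r0 ++ [1, 0], s0 ++ [1, -1], -1) by
        simp [pvStepA, hb]]
      rw [ih _ _ (-1) (Or.inr rfl)]
      simp [pvEnc, hb]
    · rw [show pvStepA (r0, s0, -1) b = (r0 ++ [0, 1], s0 ++ [-1, 1], 1) by
        simp [pvStepA, hb]]
      rw [ih _ _ 1 (Or.inl rfl)]
      simp [pvEnc, hb]

theorem foldB_eq (l : List Char) : ∀ (s0 : List Int) (c : Int),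
    l.foldl pvStepB (s0, c) = (s0 ++ (pvEnc l c).2.1, (pvEnc l c).2.2) := by
  induction l with
  | nil => intro s0 c; simp [pvEnc]
  | cons b l ih =>
    intro s0 c
    rw [List.foldl_cons]
    by_cases hb : (b == '0') = true
    · rw [show pvStepB (s0, c) b = (s0 ++ [-c, c], c) by simp [pvStepB, hb]]
      rw [ih]
      simp [pvEnc, hb]
    · rw [show pvStepB (s0, c) b = (s0 ++ [c, -c], -c) by simp [pvStepB, hb]]
      rw [ih]
      simp [pvEnc, hb]

theorem derive_eq (l : List Char) : ∀ (r0 : List Int) (c : Int), c = 1 ∨ c = -1 →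
    (pvEveryOther (pvEnc l c).2.1).foldl
      (fun r level => r ++ (if level == 1 then [1, 0] else [0, 1])) r0
    = r0 ++ (pvEnc l c).1 := by
  induction l with
  | nil => intro r0 c hc; simp [pvEnc, pvEveryOther]
  | cons b l ih =>
    intro r0 c hc
    rcases hc with h | h <;> subst h <;> by_cases hb : (b == '0') = true
    · rw [show (pvEnc (b :: l) 1).2.1 = -1 :: 1 :: (pvEnc l 1).2.1 by simp [pvEnc, hb]]
      rw [pvEveryOther, List.foldl_cons]
      rw [show (r0 ++ if ((-1 : Int) == 1) = true then [1, 0] else [0, 1]) = r0 ++ [0, 1] by norm_num]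
      rw [ih _ 1 (Or.inl rfl)]
      simp [pvEnc, hb]
    · rw [show (pvEnc (b :: l) 1).2.1 = 1 :: -1 :: (pvEnc l (-1)).2.1 by simp [pvEnc, hb]]
      rw [pvEveryOther, List.foldl_cons]
      rw [show (r0 ++ if ((1 : Int) == 1) = true then [1, 0] else [0, 1]) = r0 ++ [1, 0] by norm_num]
      rw [ih _ (-1) (Or.inr rfl)]
      simp [pvEnc, hb]
    · rw [show (pvEnc (b :: l) (-1)).2.1 = 1 :: -1 :: (pvEnc l (-1)).2.1 by simp [pvEnc, hb]]
      rw [pvEveryOther, List.foldl_cons]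
      rw [show (r0 ++ if ((1 : Int) == 1) = true then [1, 0] else [0, 1]) = r0 ++ [1, 0] by norm_num]
      rw [ih _ (-1) (Or.inr rfl)]
      simp [pvEnc, hb]
    · rw [show (pvEnc (b :: l) (-1)).2.1 = -1 :: 1 :: (pvEnc l 1).2.1 by simp [pvEnc, hb]]
      rw [pvEveryOther, List.foldl_cons]
      rw [show (r0 ++ if ((-1 : Int) == 1) = true then [1, 0] else [0, 1]) = r0 ++ [0, 1] by norm_num]
      rw [ih _ 1 (Or.inl rfl)]
      simp [pvEnc, hb]

-- ===== VERDICT (by name: the statement is the Claim_ definition above) =====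
theorem ToEncode_spec : Claim_equal_ToEncode := by
  intro data _
  unfold Spec_ToEncode ToEncode ToEncode_alt
  rw [foldA_eq data.toList [] [] 1 (Or.inl rfl), foldB_eq data.toList [] 1]
  simp only [List.nil_append]
  rw [derive_eq data.toList [] 1 (Or.inl rfl)]
  simp
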